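-- pv_equiv track=rewrite | github.com/tnoel20/Advent-of-Code-2021 | Day_2/depth_and_latitude.py | get_position_with_aim
-- ===== SOURCE A (Python) =====
-- def get_position_with_aim(course):
--     '''
--     Computes the submarine's final position after completing course.
--     Takes aim into account.
--     '''
--     DIRECTION = 0
--     DISTANCE  = 1
--
--     horizontal = 0
--     depth = 0
--     aim = 0
--
--     for step in course:
--         if step[DIRECTION] == 'up':
--             aim -= step[DISTANCE]
--         elif step[DIRECTION] == 'down':
--             aim += step[DISTANCE]
--         else:
--             horizontal += step[DISTANCE]
--             depth += aim * step[DISTANCE]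
--
--     return (horizontal, depth)
-- ===== SOURCE B (Python) =====
-- def get_position_with_aim(course):
--     '''Two-pass version: first build the prefix list of aims, then sum
--     horizontal and depth with comprehensions over the zipped course.'''
--     aims = []
--     aim = 0
--     for direction, distance in course:
--         if direction == 'up':
--             aim -= distance
--         elif direction == 'down':
--             aim += distance
--         aims.append(aim)
--     forward = [(dist, a) for (dirn, dist), a in zip(course, aims)
--                if dirn != 'up' and dirn != 'down']
--     horizontal = sum(dist for dist, _ in forward)
--     depth = sum(a * dist for dist, a in forward)
--     return (horizontal, depth)
-- ===== Notes on version B (the rewrite author's own statement) =====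
-- stated objective: alternative
-- what changed: Replaces the single loop carrying (horizontal, depth, aim) by a two-pass decomposition: a first pass builds the prefix list of aim values, then horizontal and depth are computed as sums of comprehensions over the zipped forward steps.
import Mathlib
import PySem

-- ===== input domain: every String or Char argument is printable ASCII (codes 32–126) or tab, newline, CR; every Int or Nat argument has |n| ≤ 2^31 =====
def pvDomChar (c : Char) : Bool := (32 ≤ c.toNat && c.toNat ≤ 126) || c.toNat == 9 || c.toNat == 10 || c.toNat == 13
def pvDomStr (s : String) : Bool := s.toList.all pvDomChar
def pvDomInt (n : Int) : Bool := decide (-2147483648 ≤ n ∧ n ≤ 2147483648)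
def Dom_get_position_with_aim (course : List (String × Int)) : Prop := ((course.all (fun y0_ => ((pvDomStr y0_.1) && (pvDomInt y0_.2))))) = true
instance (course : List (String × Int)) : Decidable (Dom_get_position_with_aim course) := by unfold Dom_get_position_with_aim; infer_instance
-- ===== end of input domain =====

-- B replaces A's single accumulator loop by a two-pass decomposition (prefix aim list, then comprehension sums); same O(n) cost.


-- ===== PORT A =====
-- A: one loop over course carrying (horizontal, depth, aim).
def get_position_with_aim (course : List (String × Int)) : Int × Int :=
  let r := course.foldl
    (fun (st : Int × Int × Int) (step : String × Int) =>
      if step.1 == "up" then (st.1, st.2.1, st.2.2 - step.2)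
      else if step.1 == "down" then (st.1, st.2.1, st.2.2 + step.2)
      else (st.1 + step.2, st.2.1 + st.2.2 * step.2, st.2.2))
    (0, 0, 0)
  (r.1, r.2.1)

-- ===== PORT B =====
-- B pass 1: prefix list of aim values (aims.append(aim) after each step).
def pvAims (a : Int) : List (String × Int) → List Int
  | [] => []
  | (dirn, dist) :: rest =>
      let a' := if dirn == "up" then a - dist
                else if dirn == "down" then a + dist
                else a
      a' :: pvAims a' rest

-- B pass 2: filter forward steps from the zipped course, then two sums.
def get_position_with_aim_alt (course : List (String × Int)) : Int × Int :=
  let aims := pvAims 0 course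
  let forward := ((course.zip aims).filter
      (fun p => !(p.1.1 == "up") && !(p.1.1 == "down"))).map
      (fun p => (p.1.2, p.2))
  let horizontal := (forward.map (fun p => p.1)).sum
  let depth := (forward.map (fun p => p.2 * p.1)).sum
  (horizontal, depth)

-- ===== PRECONDITION & SPEC =====
def Spec_get_position_with_aim (course : List (String × Int)) (out : Int × Int) : Prop := out = get_position_with_aim_alt course
instance (course : List (String × Int)) (out : Int × Int) : Decidable (Spec_get_position_with_aim course out) := by unfold Spec_get_position_with_aim; infer_instance

-- ===== CLAIM (what is proved, stated in full; the proofs are below) =====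
def Claim_equal_get_position_with_aim : Prop := ∀ (course : List (String × Int)), Dom_get_position_with_aim course → Spec_get_position_with_aim course (get_position_with_aim course)

-- ===== LEMMAS AND PROOFS =====

-- Loop invariant: A's fold from an arbitrary state (h, d, a) adds exactly
-- B's two sums computed with the prefix aims starting at a.
theorem pv_loop_eq (course : List (String × Int)) (h d a : Int) :
    course.foldl
      (fun (st : Int × Int × Int) (step : String × Int) =>
        if step.1 == "up" then (st.1, st.2.1, st.2.2 - step.2)
        else if step.1 == "down" then (st.1, st.2.1, st.2.2 + step.2)
        else (st.1 + step.2, st.2.1 + st.2.2 * step.2, st.2.2))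
      (h, d, a)
    = (h + ((((course.zip (pvAims a course)).filter
          (fun p => !(p.1.1 == "up") && !(p.1.1 == "down"))).map
          (fun p => (p.1.2, p.2))).map (fun p => p.1)).sum,
       d + ((((course.zip (pvAims a course)).filter
          (fun p => !(p.1.1 == "up") && !(p.1.1 == "down"))).map
          (fun p => (p.1.2, p.2))).map (fun p => p.2 * p.1)).sum,
       (course.foldl
         (fun (st : Int × Int × Int) (step : String × Int) =>
           if step.1 == "up" then (st.1, st.2.1, st.2.2 - step.2)
           else if step.1 == "down" then (st.1, st.2.1, st.2.2 + step.2)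
           else (st.1 + step.2, st.2.1 + st.2.2 * step.2, st.2.2))
         (h, d, a)).2.2) := by
  induction course generalizing h d a with
  | nil => simp [pvAims]
  | cons step rest ih =>
    obtain ⟨dirn, dist⟩ := step
    by_cases hu : dirn == "up"
    · simp only [List.foldl_cons, pvAims, List.zip_cons_cons, List.filter_cons, hu,
        Bool.not_true, Bool.false_and, if_true, if_false, Bool.false_eq_true]
      exact ih h d (a - dist)
    · by_cases hd : dirn == "down"
      · simp only [List.foldl_cons, pvAims, List.zip_cons_cons, List.filter_cons, hu, hd,
          Bool.not_true, Bool.not_false, Bool.and_false,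
          if_true, if_false, Bool.false_eq_true]
        exact ih h d (a + dist)
      · simp only [List.foldl_cons, pvAims, List.zip_cons_cons, List.filter_cons, hu, hd,
          Bool.not_false, Bool.true_and, if_true, if_false, Bool.false_eq_true,
          List.map_cons, List.sum_cons]
        rw [ih]
        refine Prod.ext ?_ (Prod.ext ?_ rfl) <;> simp <;> ring

-- ===== VERDICT (by name: the statement is the Claim_ definition above) =====
theorem get_position_with_aim_spec : Claim_equal_get_position_with_aim := by
  intro course _
  show _ = _
  simp only [get_position_with_aim, get_position_with_aim_alt]
  rw [pv_loop_eq]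
  simp
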